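-- pv_equiv track=rewrite | github.com/cl0nazepamm/P_USDExporter | chasers/Clone_USD_PropertiesChaser.py | _remap_path_str
-- ===== SOURCE A (Python) =====
-- def _remap_path_str(path_str, strip_prefix, nest_target, mtl_names, replacement_prefix=None):
--     """Compute new path string. Returns remapped string or None if unchanged."""
--     if nest_target and mtl_names:
--         for mtl_name in mtl_names:
--             mtl_prefix = strip_prefix + "/" + mtl_name
--             if path_str.startswith(mtl_prefix + "/") or path_str == mtl_prefix:
--                 return "/" + nest_target + "/" + mtl_name + path_str[len(mtl_prefix):]
--     if path_str.startswith(strip_prefix + "/"):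
--         suffix = path_str[len(strip_prefix):]
--         if replacement_prefix is None:
--             return suffix
--         if replacement_prefix == "/":
--             return suffix
--         return replacement_prefix.rstrip("/") + suffix
--     if path_str == strip_prefix:
--         if replacement_prefix is not None:
--             return replacement_prefix if replacement_prefix else "/"
--         return "/"
--     return None
-- ===== SOURCE B (Python) =====
-- def _remap_path_str(path_str, strip_prefix, nest_target, mtl_names, replacement_prefix=None):
--     """Compute new path string. Returns remapped string or None if unchanged."""
--     base = strip_prefix + "/"
--     if nest_target and mtl_names and path_str.startswith(base):
--         rest = path_str[len(base):]
--         names = set(mtl_names)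
--         # a name matches iff it is `rest` itself or a prefix of `rest` ending right
--         # before a '/'; in every such case the remapped path is the same string.
--         if rest in names or any(
--             c == "/" and rest[:i] in names for i, c in enumerate(rest)
--         ):
--             return "/" + nest_target + "/" + rest
--     if path_str.startswith(base):
--         head = replacement_prefix.rstrip("/") if replacement_prefix is not None else ""
--         return head + path_str[len(strip_prefix):]
--     if path_str == strip_prefix:
--         return replacement_prefix or "/"
--     return None
-- ===== Notes on version B (the rewrite author's own statement) =====
-- stated objective: faster
-- what changed: B strips strip_prefix+'/' once and tests the remainder's '/'-cut prefixes against a set of the material names in a single scan, instead of A's per-name loop building and prefix-testing two candidate path strings per material name; the fall-through prefix/suffix/equality branches are folded into one concatenation.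
import Mathlib
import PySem

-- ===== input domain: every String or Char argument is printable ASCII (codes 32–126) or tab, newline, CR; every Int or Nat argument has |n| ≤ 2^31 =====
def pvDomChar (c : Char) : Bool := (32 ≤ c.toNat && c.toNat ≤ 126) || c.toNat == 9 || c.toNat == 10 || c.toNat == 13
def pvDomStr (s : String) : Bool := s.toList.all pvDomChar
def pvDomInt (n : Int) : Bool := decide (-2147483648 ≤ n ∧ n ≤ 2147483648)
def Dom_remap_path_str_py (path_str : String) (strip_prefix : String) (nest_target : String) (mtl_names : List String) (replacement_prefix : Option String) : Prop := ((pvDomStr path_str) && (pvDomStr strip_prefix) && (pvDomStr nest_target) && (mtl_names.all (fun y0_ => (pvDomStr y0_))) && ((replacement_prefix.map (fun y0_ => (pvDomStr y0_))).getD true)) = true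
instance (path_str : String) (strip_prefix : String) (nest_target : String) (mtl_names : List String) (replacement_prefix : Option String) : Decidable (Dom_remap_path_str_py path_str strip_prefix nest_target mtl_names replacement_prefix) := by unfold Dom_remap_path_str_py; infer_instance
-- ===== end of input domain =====

-- B replaces A's per-material-name loop (each iteration building and prefix-testing two
-- candidate path strings) with one prefix strip plus a single scan of the remainder testing
-- its '/'-cut prefixes against a set of the names; objective: faster (measured by the check).

-- ===== PORT A =====
-- r.rstrip("/") — PySem has no chars-argument rstrip; exact hand port: remove all trailing '/'
def pvRstripSlash (r : String) : String :=
  String.ofList ((r.toList.reverse.dropWhile (fun c => c = '/')).reverse)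

-- the 'for mtl_name in mtl_names' loop with its early returns
def pvLoopA (path_str strip_prefix nest_target : String) : List String → Option String
  | [] => none
  | mtl_name :: rest_names =>
    let mtl_prefix := strip_prefix ++ "/" ++ mtl_name
    if PySem.Str.startswith path_str (mtl_prefix ++ "/") = true ∨ path_str = mtl_prefix then
      some ("/" ++ nest_target ++ "/" ++ mtl_name ++
            PySem.Str.slice path_str (some (PySem.Str.len mtl_prefix)) none)
    else pvLoopA path_str strip_prefix nest_target rest_names

def remap_path_str_py (path_str : String) (strip_prefix : String) (nest_target : String) (mtl_names : List String) (replacement_prefix : Option String) : Option String :=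
  match (if nest_target ≠ "" ∧ mtl_names ≠ [] then
           pvLoopA path_str strip_prefix nest_target mtl_names
         else none) with
  | some r => some r
  | none =>
    if PySem.Str.startswith path_str (strip_prefix ++ "/") = true then
      let suffix := PySem.Str.slice path_str (some (PySem.Str.len strip_prefix)) none
      match replacement_prefix with
      | none => some suffix
      | some r => if r = "/" then some suffix else some (pvRstripSlash r ++ suffix)
    else if path_str = strip_prefix then
      match replacement_prefix with
      | some r => some (if r ≠ "" then r else "/")
      | none => some "/"
    else none

-- ===== PORT B =====
def remap_path_str_py_alt (path_str : String) (strip_prefix : String) (nest_target : String) (mtl_names : List String) (replacement_prefix : Option String) : Option String :=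
  let base := strip_prefix ++ "/"
  let nestRes : Option String :=
    if nest_target ≠ "" ∧ mtl_names ≠ [] ∧ PySem.Str.startswith path_str base = true then
      let rest := PySem.Str.slice path_str (some (PySem.Str.len base)) none
      let names : PySem.Set String := PySem.Set.ofList mtl_names
      if PySem.Set.contains names rest = true ∨
         (PySem.List.enumerate rest.toList).any
           (fun p => p.2 == '/' && PySem.Set.contains names (PySem.Str.slice rest none (some p.1))) = true then
        some ("/" ++ nest_target ++ "/" ++ rest)
      else none
    else none
  match nestRes with
  | some r => some r
  | none =>
    if PySem.Str.startswith path_str base = true then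
      let head := match replacement_prefix with
        | some r => pvRstripSlash r
        | none => ""
      some (head ++ PySem.Str.slice path_str (some (PySem.Str.len strip_prefix)) none)
    else if path_str = strip_prefix then
      some (match replacement_prefix with
            | some r => if r ≠ "" then r else "/"
            | none => "/")
    else none

-- ===== PRECONDITION & SPEC =====
def Spec_remap_path_str_py (path_str : String) (strip_prefix : String) (nest_target : String) (mtl_names : List String) (replacement_prefix : Option String) (out : Option String) : Prop := out = remap_path_str_py_alt path_str strip_prefix nest_target mtl_names replacement_prefix
instance (path_str : String) (strip_prefix : String) (nest_target : String) (mtl_names : List String) (replacement_prefix : Option String) (out : Option String) : Decidable (Spec_remap_path_str_py path_str strip_prefix nest_target mtl_names replacement_prefix out) := by unfold Spec_remap_path_str_py; infer_instance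

-- ===== CLAIM (what is proved, stated in full; the proofs are below) =====
def Claim_equal_remap_path_str_py : Prop := ∀ (path_str : String) (strip_prefix : String) (nest_target : String) (mtl_names : List String) (replacement_prefix : Option String), Dom_remap_path_str_py path_str strip_prefix nest_target mtl_names replacement_prefix → Spec_remap_path_str_py path_str strip_prefix nest_target mtl_names replacement_prefix (remap_path_str_py path_str strip_prefix nest_target mtl_names replacement_prefix)

-- ===== LEMMAS AND PROOFS =====

-- a single name matches A's nest condition iff the stripped remainder R equals it
-- or starts with it followed by '/'
lemma pv_cond_iff (path sp name : String) (R : List Char)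
    (hP : path.toList = sp.toList ++ '/' :: R) :
    (PySem.Str.startswith path ((sp ++ "/" ++ name) ++ "/") = true ∨ path = sp ++ "/" ++ name)
      ↔ (R = name.toList ∨ name.toList ++ ['/'] <+: R) := by
  rw [← String.toList_inj]
  simp only [pysem, String.toList_append, hP]
  have h1 : ("/" : String).toList = ['/'] := by decide
  rw [h1]
  constructor
  · rintro (h | h)
    · right
      have := (List.prefix_append_right_inj (sp.toList ++ ['/'])).mp (by simpa using h)
      simpa using this
    · left
      have : sp.toList ++ '/' :: R = sp.toList ++ '/' :: name.toList := by simpa using h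
      simpa using this
  · rintro (h | h)
    · right; simp [h]
    · left
      have := (List.prefix_append_right_inj (sp.toList ++ ['/'])).mpr h
      simpa using this

-- value returned by A at a matching name equals '/'+nt+'/'+R, independent of the name
lemma pv_val_eq (path sp nt name : String) (R : List Char)
    (hP : path.toList = sp.toList ++ '/' :: R)
    (hm : R = name.toList ∨ name.toList ++ ['/'] <+: R) :
    ("/" ++ nt ++ "/" ++ name ++
      PySem.Str.slice path (some (PySem.Str.len (sp ++ "/" ++ name))) none).toList
      = ('/' :: nt.toList) ++ '/' :: R := by
  have hpre : name.toList <+: R := by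
    rcases hm with h | h
    · exact h ▸ List.prefix_refl _
    · exact (List.prefix_append _ _).trans h
  obtain ⟨t, ht⟩ := hpre
  have hsl : (PySem.Str.slice path (some (PySem.Str.len (sp ++ "/" ++ name))) none).toList = t := by
    simp only [pysem, String.toList_append, hP, ← ht]
    have h1 : ("/" : String).toList = ['/'] := by decide
    have h2 : sp.toList ++ '/' :: (name.toList ++ t) = (sp.toList ++ ['/'] ++ name.toList) ++ t := by
      simp
    rw [h1, h2, List.drop_left]
  rw [String.toList_append, hsl]
  simp [String.toList_append, ← ht]

-- the core re-indexing: some name matches iff R itself or one of its '/'-cut prefixes is a name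
lemma pv_core (R : List Char) (L : List String) :
    (∃ n ∈ L, R = n.toList ∨ n.toList ++ ['/'] <+: R)
      ↔ (String.ofList R ∈ L ∨ ∃ i : Nat, ∃ _ : i < R.length, R[i]'(by omega) = '/' ∧ String.ofList (R.take i) ∈ L) := by
  constructor
  · rintro ⟨n, hn, h | h⟩
    · left; rw [h]; simpa using hn
    · obtain ⟨t, ht⟩ := h
      have hR : R = n.toList ++ '/' :: t := by rw [← ht]; simp
      subst hR
      right
      refine ⟨n.toList.length, by simp, ?_, ?_⟩
      · simp [List.getElem_append_right]
      · rw [List.take_left]; simpa using hn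
  · rintro (h | ⟨i, hi, hc, hm⟩)
    · exact ⟨String.ofList R, h, Or.inl (by simp)⟩
    · refine ⟨String.ofList (R.take i), hm, Or.inr ⟨R.drop (i + 1), ?_⟩⟩
      simp only [String.toList_ofList]
      conv_rhs => rw [← List.take_append_drop i R, List.drop_eq_getElem_cons hi, hc]
      simp

-- the shared fall-through (non-nest) branches agree
lemma pv_tail_eq (p sp : String) (rp : Option String) :
    (if PySem.Str.startswith p (sp ++ "/") = true then
        match rp with
        | none => some (PySem.Str.slice p (some (PySem.Str.len sp)) none)
        | some r =>
          if r = "/" then some (PySem.Str.slice p (some (PySem.Str.len sp)) none)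
          else some (pvRstripSlash r ++ PySem.Str.slice p (some (PySem.Str.len sp)) none)
      else if p = sp then
        match rp with
        | some r => some (if r ≠ "" then r else "/")
        | none => some "/"
      else none)
    = (if PySem.Str.startswith p (sp ++ "/") = true then
        some ((match rp with | some r => pvRstripSlash r | none => "") ++
              PySem.Str.slice p (some (PySem.Str.len sp)) none)
      else if p = sp then
        some (match rp with | some r => if r ≠ "" then r else "/" | none => "/")
      else none) := by
  by_cases hsw : PySem.Str.startswith p (sp ++ "/") = true
  · rw [if_pos hsw, if_pos hsw]
    cases rp with
    | none => rfl
    | some r =>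
      simp only []
      by_cases hr : r = "/"
      · have h0 : pvRstripSlash "/" = "" := by decide
        rw [if_pos hr, hr, h0]
        rfl
      · rw [if_neg hr]
  · rw [if_neg hsw, if_neg hsw]
    by_cases hps : p = sp
    · rw [if_pos hps, if_pos hps]
      cases rp <;> rfl
    · rw [if_neg hps, if_neg hps]

-- A's loop returns nothing when the path does not start with strip_prefix + '/'
lemma pv_loopA_none (p sp nt : String) (h : ¬ (sp ++ "/").toList <+: p.toList) :
    ∀ names : List String, pvLoopA p sp nt names = none := by
  intro names
  induction names with
  | nil => rfl
  | cons n ns ih =>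
    unfold pvLoopA
    rw [if_neg, ih]
    rintro (hc | hc)
    · apply h
      simp only [PySem.Str.startswith_eq, PySem.Chars.startswith_iff] at hc
      have hpp : (sp ++ "/").toList <+: ((sp ++ "/" ++ n) ++ "/").toList := by
        simp only [String.toList_append]
        exact ⟨n.toList ++ ("/" : String).toList, by simp⟩
      exact hpp.trans hc
    · apply h
      rw [hc]
      simp only [String.toList_append]
      exact ⟨n.toList, by simp⟩

-- characterization of A's loop on a decomposed path
lemma pv_loopA_char (p sp nt : String) (R : List Char)
    (hP : p.toList = sp.toList ++ '/' :: R) :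
    ∀ names : List String,
      pvLoopA p sp nt names
        = if ∃ n ∈ names, R = n.toList ∨ n.toList ++ ['/'] <+: R
          then some (String.ofList (('/' :: nt.toList) ++ '/' :: R)) else none := by
  intro names
  induction names with
  | nil => simp [pvLoopA]
  | cons n ns ih =>
    unfold pvLoopA
    by_cases hc : (PySem.Str.startswith p ((sp ++ "/" ++ n) ++ "/") = true ∨ p = sp ++ "/" ++ n)
    · rw [if_pos hc]
      have hm := (pv_cond_iff p sp n R hP).mp hc
      rw [if_pos ⟨n, List.mem_cons_self, hm⟩]
      congr 1
      rw [← String.toList_inj, pv_val_eq p sp nt n R hP hm]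
      simp
    · rw [if_neg hc, ih]
      have hm : ¬ (R = n.toList ∨ n.toList ++ ['/'] <+: R) := fun h =>
        hc ((pv_cond_iff p sp n R hP).mpr h)
      by_cases hex : ∃ m ∈ ns, R = m.toList ∨ m.toList ++ ['/'] <+: R
      · obtain ⟨m, hmem, hmm⟩ := hex
        rw [if_pos ⟨m, hmem, hmm⟩, if_pos ⟨m, List.mem_cons_of_mem _ hmem, hmm⟩]
      · rw [if_neg hex, if_neg ?_]
        rintro ⟨m, hmem, hmm⟩
        rcases List.mem_cons.mp hmem with rfl | hmem'
        · exact hm hmm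
        · exact hex ⟨m, hmem', hmm⟩

-- B's boolean hit test equals the existence of a matching name
lemma pv_B_cond (rest : String) (mtls : List String) :
    (PySem.Set.contains (PySem.Set.ofList mtls) rest = true ∨
     (PySem.List.enumerate rest.toList).any
       (fun q => q.2 == '/' &&
         PySem.Set.contains (PySem.Set.ofList mtls) (PySem.Str.slice rest none (some q.1))) = true)
      ↔ (∃ n ∈ mtls, rest.toList = n.toList ∨ n.toList ++ ['/'] <+: rest.toList) := by
  rw [pv_core rest.toList mtls]
  have hrst : String.ofList rest.toList = rest := by simp
  constructor
  · rintro (h | h)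
    · left
      rw [hrst]
      simpa [PySem.Set.contains_iff, PySem.Set.mem_ofList] using h
    · right
      rw [List.any_eq_true] at h
      obtain ⟨q, hq, hqp⟩ := h
      rw [PySem.List.mem_enumerate_iff] at hq
      obtain ⟨k, hk, rfl⟩ := hq
      rw [Bool.and_eq_true, beq_iff_eq] at hqp
      refine ⟨k, hk, hqp.1, ?_⟩
      have := hqp.2
      rw [PySem.Set.contains_iff, PySem.Set.mem_ofList] at this
      have hsl : PySem.Str.slice rest none (some (0 + (k : Int))) = String.ofList (rest.toList.take k) := by
        rw [← String.toList_inj]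
        simp [pysem]
      rwa [hsl] at this
  · rintro (h | ⟨i, hi, hc, hm⟩)
    · left
      rw [hrst] at h
      simpa [PySem.Set.contains_iff, PySem.Set.mem_ofList] using h
    · right
      rw [List.any_eq_true]
      refine ⟨((i : Int), rest.toList[i]'hi), ?_, ?_⟩
      · rw [PySem.List.mem_enumerate_iff]
        exact ⟨i, hi, by simp⟩
      · rw [Bool.and_eq_true, beq_iff_eq]
        refine ⟨hc, ?_⟩
        rw [PySem.Set.contains_iff, PySem.Set.mem_ofList]
        have hsl : PySem.Str.slice rest none (some (i : Int)) = String.ofList (rest.toList.take i) := by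
          rw [← String.toList_inj]
          simp [pysem]
        rw [hsl]
        exact hm

-- ===== VERDICT (by name: the statement is the Claim_ definition above) =====
theorem remap_path_str_py_spec : Claim_equal_remap_path_str_py := by
  intro p sp nt mtls rp _
  show remap_path_str_py p sp nt mtls rp = remap_path_str_py_alt p sp nt mtls rp
  unfold remap_path_str_py remap_path_str_py_alt
  simp only []
  by_cases hsw : PySem.Str.startswith p (sp ++ "/") = true
  · have hpre : (sp ++ "/").toList <+: p.toList := by
      simpa only [PySem.Str.startswith_eq, PySem.Chars.startswith_iff] using hsw
    obtain ⟨R, hR⟩ := hpre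
    have hP : p.toList = sp.toList ++ '/' :: R := by
      rw [← hR]; simp [String.toList_append]
    have hrest : (PySem.Str.slice p (some (PySem.Str.len (sp ++ "/"))) none).toList = R := by
      simp only [pysem, String.toList_append, hP]
      have h1 : ("/" : String).toList = ['/'] := by decide
      have h2 : sp.toList ++ '/' :: R = (sp.toList ++ ['/']) ++ R := by simp
      rw [h1, h2, List.drop_left]
    by_cases hnm : nt ≠ "" ∧ mtls ≠ []
    · have hTriple : nt ≠ "" ∧ mtls ≠ [] ∧ PySem.Str.startswith p (sp ++ "/") = true :=
        ⟨hnm.1, hnm.2, hsw⟩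
      rw [if_pos hnm, pv_loopA_char p sp nt R hP mtls]
      simp only [if_pos hTriple]
      by_cases hex : ∃ n ∈ mtls, R = n.toList ∨ n.toList ++ ['/'] <+: R
      · rw [if_pos hex]
        have hBcond := (pv_B_cond (PySem.Str.slice p (some (PySem.Str.len (sp ++ "/"))) none) mtls).mpr
          (by rw [hrest]; exact hex)
        rw [if_pos hBcond]
        show some (String.ofList ('/' :: nt.toList ++ '/' :: R))
          = some ("/" ++ nt ++ "/" ++ PySem.Str.slice p (some (PySem.Str.len (sp ++ "/"))) none)
        congr 1
        rw [← String.toList_inj]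
        simp only [String.toList_append, hrest]
        have h1 : ("/" : String).toList = ['/'] := by decide
        rw [h1]
        simp
      · rw [if_neg hex]
        have hnB : ¬ (PySem.Set.contains (PySem.Set.ofList mtls)
              (PySem.Str.slice p (some (PySem.Str.len (sp ++ "/"))) none) = true ∨
            (PySem.List.enumerate (PySem.Str.slice p (some (PySem.Str.len (sp ++ "/"))) none).toList).any
              (fun q => q.2 == '/' && PySem.Set.contains (PySem.Set.ofList mtls)
                (PySem.Str.slice (PySem.Str.slice p (some (PySem.Str.len (sp ++ "/"))) none) none (some q.1))) = true) := by
          intro hBcond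
          exact hex (by rw [← hrest]; exact (pv_B_cond _ mtls).mp hBcond)
        rw [if_neg hnB]
        exact pv_tail_eq p sp rp
    · have hnT : ¬ (nt ≠ "" ∧ mtls ≠ [] ∧ PySem.Str.startswith p (sp ++ "/") = true) :=
        fun h => hnm ⟨h.1, h.2.1⟩
      rw [if_neg hnm, if_neg hnT]
      exact pv_tail_eq p sp rp
  · have hnp : ¬ (sp ++ "/").toList <+: p.toList := by
      intro h
      exact hsw (by simpa only [PySem.Str.startswith_eq, PySem.Chars.startswith_iff] using h)
    have hA : (if nt ≠ "" ∧ mtls ≠ [] then pvLoopA p sp nt mtls else none) = none := by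
      split_ifs with h
      · exact pv_loopA_none p sp nt hnp mtls
      · rfl
    have hnT : ¬ (nt ≠ "" ∧ mtls ≠ [] ∧ PySem.Str.startswith p (sp ++ "/") = true) :=
      fun h => hsw h.2.2
    rw [hA, if_neg hnT]
    rw [if_neg hsw, if_neg hsw]
    by_cases hps : p = sp
    · rw [if_pos hps, if_pos hps]
      cases rp <;> rfl
    · rw [if_neg hps, if_neg hps]
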